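-- pv_equiv track=rewrite | github.com/yunea/ca-feu | feu00.py | list_rectangle
-- ===== SOURCE A (Python) =====
-- def line(arg) :
--   i = 0
--   match arg :
--     case 1 :
--       return "o"
--     case 2 :
--       return "oo"
--     case _ :
--       s = "o"
--       while i < arg-2 :
--         s += "-"
--         i += 1
--       s += "o"
--       return s
--
-- def center_line(arg) :
--   i = 0
--   match arg :
--     case 1 :
--       return "|"
--     case 2 :
--       return "||"
--     case _ :
--       s = "|"
--       while i < arg-2 :
--         s += " "
--         i += 1
--       s += "|"
--       return s
--
-- def list_rectangle(arg1, arg2) :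
--   i = 0
--   rows = []
--   match arg2 :
--     case 1 :
--       rows.append(line(arg1))
--       return rows
--     case 2 :
--       rows.append(line(arg1))
--       rows.append(line(arg1))
--       return rows
--     case _ :
--       # ajout de la première ligne
--       rows.append(line(arg1))
--       while i < arg2-2 :
--         # ajout des lignes au centre
--         rows.append(center_line(arg1))
--         i += 1
--       # ajout de la dernière ligne
--       rows.append(line(arg1))
--       return rows
-- ===== SOURCE B (Python) =====
-- def list_rectangle(arg1, arg2):
--     top = "o" if arg1 == 1 else "o" + "-" * max(arg1 - 2, 0) + "o"
--     if arg2 == 1: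
--         return [top]
--     mid = "|" if arg1 == 1 else "|" + " " * max(arg1 - 2, 0) + "|"
--     return [top] + [mid] * max(arg2 - 2, 0) + [top]
-- ===== Notes on version B (the rewrite author's own statement) =====
-- stated objective: simpler
-- what changed: Replaces the three per-character/per-row while-loops and match statements with closed-form string repetition ('o' + '-'*n + 'o') and list repetition ([top] + [mid]*m + [top]) using max for the counts.
import Mathlib
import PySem

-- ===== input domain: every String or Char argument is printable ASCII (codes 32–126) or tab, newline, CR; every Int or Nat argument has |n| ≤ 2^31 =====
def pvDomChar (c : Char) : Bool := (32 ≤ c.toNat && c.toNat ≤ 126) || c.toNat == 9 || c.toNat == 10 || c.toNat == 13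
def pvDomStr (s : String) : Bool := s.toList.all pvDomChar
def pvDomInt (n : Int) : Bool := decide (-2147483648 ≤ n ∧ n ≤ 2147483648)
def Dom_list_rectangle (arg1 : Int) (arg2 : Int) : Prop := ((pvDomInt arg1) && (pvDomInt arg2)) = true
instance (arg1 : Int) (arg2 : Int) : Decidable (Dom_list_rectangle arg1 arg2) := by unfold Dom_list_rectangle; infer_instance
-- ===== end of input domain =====

-- B replaces A's character-by-character while-loops with closed-form string/list repetition (objective: simpler).

-- ===== PORT A =====
-- strings are built on the List Char side (PySem convention) and wrapped with String.mk at the end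

-- while i < arg-2 : s += "-" ; i += 1
def pvLineLoop (arg : Int) (i : Int) (s : List Char) : List Char :=
  if i < arg - 2 then pvLineLoop arg (i + 1) (s ++ ['-']) else s
termination_by (arg - 2 - i).toNat
decreasing_by omega

def pvLine (arg : Int) : String :=
  if arg = 1 then "o"
  else if arg = 2 then "oo"
  else String.mk (pvLineLoop arg 0 ['o'] ++ ['o'])

-- while i < arg-2 : s += " " ; i += 1
def pvCenterLoop (arg : Int) (i : Int) (s : List Char) : List Char :=
  if i < arg - 2 then pvCenterLoop arg (i + 1) (s ++ [' ']) else s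
termination_by (arg - 2 - i).toNat
decreasing_by omega

def pvCenterLine (arg : Int) : String :=
  if arg = 1 then "|"
  else if arg = 2 then "||"
  else String.mk (pvCenterLoop arg 0 ['|'] ++ ['|'])

-- while i < arg2-2 : rows.append(center_line(arg1)) ; i += 1
def pvRowsLoop (arg1 : Int) (arg2 : Int) (i : Int) (rows : List String) : List String :=
  if i < arg2 - 2 then pvRowsLoop arg1 arg2 (i + 1) (rows ++ [pvCenterLine arg1]) else rows
termination_by (arg2 - 2 - i).toNat
decreasing_by omega

def list_rectangle (arg1 : Int) (arg2 : Int) : List String :=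
  if arg2 = 1 then [pvLine arg1]
  else if arg2 = 2 then [pvLine arg1] ++ [pvLine arg1]
  else (pvRowsLoop arg1 arg2 0 [pvLine arg1]) ++ [pvLine arg1]

-- ===== PORT B =====
-- "o" + "-" * max(arg1-2, 0) + "o"   (the * is List.replicate on the char-list side)
def pvTop (arg1 : Int) : String :=
  if arg1 = 1 then "o"
  else String.mk (['o'] ++ List.replicate (max (arg1 - 2) 0).toNat '-' ++ ['o'])

def pvMid (arg1 : Int) : String :=
  if arg1 = 1 then "|"
  else String.mk (['|'] ++ List.replicate (max (arg1 - 2) 0).toNat ' ' ++ ['|'])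

def list_rectangle_alt (arg1 : Int) (arg2 : Int) : List String :=
  if arg2 = 1 then [pvTop arg1]
  else [pvTop arg1] ++ List.replicate (max (arg2 - 2) 0).toNat (pvMid arg1) ++ [pvTop arg1]

-- ===== PRECONDITION & SPEC =====
def Spec_list_rectangle (arg1 : Int) (arg2 : Int) (out : List String) : Prop := out = list_rectangle_alt arg1 arg2
instance (arg1 : Int) (arg2 : Int) (out : List String) : Decidable (Spec_list_rectangle arg1 arg2 out) := by unfold Spec_list_rectangle; infer_instance

-- ===== CLAIM (what is proved, stated in full; the proofs are below) =====
def Claim_equal_list_rectangle : Prop := ∀ (arg1 : Int) (arg2 : Int), Dom_list_rectangle arg1 arg2 → Spec_list_rectangle arg1 arg2 (list_rectangle arg1 arg2)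

-- ===== LEMMAS AND PROOFS =====

theorem pvLineLoop_eq (arg : Int) : ∀ (n : Nat) (i : Int) (s : List Char),
    (arg - 2 - i).toNat = n → pvLineLoop arg i s = s ++ List.replicate n '-' := by
  intro n
  induction n with
  | zero =>
    intro i s h
    rw [pvLineLoop]
    simp only [if_neg (by omega : ¬ i < arg - 2), List.replicate, List.append_nil]
  | succ n ih =>
    intro i s h
    rw [pvLineLoop]
    rw [if_pos (by omega : i < arg - 2), ih (i + 1) _ (by omega)]
    simp only [List.append_assoc, List.singleton_append, List.replicate_succ]

theorem pvCenterLoop_eq (arg : Int) : ∀ (n : Nat) (i : Int) (s : List Char),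
    (arg - 2 - i).toNat = n → pvCenterLoop arg i s = s ++ List.replicate n ' ' := by
  intro n
  induction n with
  | zero =>
    intro i s h
    rw [pvCenterLoop]
    simp only [if_neg (by omega : ¬ i < arg - 2), List.replicate, List.append_nil]
  | succ n ih =>
    intro i s h
    rw [pvCenterLoop]
    rw [if_pos (by omega : i < arg - 2), ih (i + 1) _ (by omega)]
    simp only [List.append_assoc, List.singleton_append, List.replicate_succ]

theorem pvLine_eq_top (arg : Int) : pvLine arg = pvTop arg := by
  unfold pvLine pvTop
  by_cases h1 : arg = 1
  · simp [h1]
  · by_cases h2 : arg = 2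
    · subst h2; simp; decide
    · rw [if_neg h1, if_neg h2, if_neg h1,
        pvLineLoop_eq arg (arg - 2).toNat 0 ['o'] (by omega)]
      have : (max (arg - 2) 0).toNat = (arg - 2).toNat := by omega
      rw [this]

theorem pvCenter_eq_mid (arg : Int) : pvCenterLine arg = pvMid arg := by
  unfold pvCenterLine pvMid
  by_cases h1 : arg = 1
  · simp [h1]
  · by_cases h2 : arg = 2
    · subst h2; simp; decide
    · rw [if_neg h1, if_neg h2, if_neg h1,
        pvCenterLoop_eq arg (arg - 2).toNat 0 ['|'] (by omega)]
      have : (max (arg - 2) 0).toNat = (arg - 2).toNat := by omega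
      rw [this]

theorem pvRowsLoop_eq (arg1 arg2 : Int) : ∀ (n : Nat) (i : Int) (rows : List String),
    (arg2 - 2 - i).toNat = n → pvRowsLoop arg1 arg2 i rows = rows ++ List.replicate n (pvCenterLine arg1) := by
  intro n
  induction n with
  | zero =>
    intro i rows h
    rw [pvRowsLoop]
    simp only [if_neg (by omega : ¬ i < arg2 - 2), List.replicate, List.append_nil]
  | succ n ih =>
    intro i rows h
    rw [pvRowsLoop]
    rw [if_pos (by omega : i < arg2 - 2), ih (i + 1) _ (by omega)]
    simp only [List.append_assoc, List.singleton_append, List.replicate_succ]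

-- ===== VERDICT (by name: the statement is the Claim_ definition above) =====
theorem list_rectangle_spec : Claim_equal_list_rectangle := by
  intro arg1 arg2 _
  unfold Spec_list_rectangle list_rectangle list_rectangle_alt
  by_cases h1 : arg2 = 1
  · simp [h1, pvLine_eq_top]
  · by_cases h2 : arg2 = 2
    · subst h2
      simp [pvLine_eq_top]
    · rw [if_neg h1, if_neg h2, if_neg h1,
        pvRowsLoop_eq arg1 arg2 (arg2 - 2).toNat 0 [pvLine arg1] (by omega)]
      have : (max (arg2 - 2) 0).toNat = (arg2 - 2).toNat := by omega
      rw [this]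
      simp [pvLine_eq_top, pvCenter_eq_mid]
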